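-- pv_equiv track=rewrite | github.com/LeoStehlik/visual-architecture | skills/visual-architecture/scripts/render_architecture.py | clean_points
-- ===== SOURCE A (Python) =====
-- def clean_points(points):
--     cleaned = [points[0]]
--     for point in points[1:]:
--         if point != cleaned[-1]:
--             cleaned.append(point)
--
--     final = [cleaned[0]]
--     for point in cleaned[1:]:
--         if len(final) >= 2:
--             ax, ay = final[-2]
--             bx, by = final[-1]
--             cx, cy = point
--             if (ax == bx == cx) or (ay == by == cy):
--                 final[-1] = point
--                 continue
--         final.append(point)
--     return final
-- ===== SOURCE B (Python) =====
-- def clean_points(points):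
--     out = []
--     a = None
--     b = points[0]
--     for p in points[1:]:
--         if p == b:
--             continue
--         if a is not None and (a[0] == b[0] == p[0] or a[1] == b[1] == p[1]):
--             b = p
--         else:
--             out.append(b)
--             a, b = b, p
--     out.append(b)
--     return out
-- ===== Notes on version B (the rewrite author's own statement) =====
-- stated objective: alternative
-- what changed: replaces A's two staged passes and in-place final[-1] mutation by one pass holding a pending pair (previous point a, pending point b): duplicates are skipped against b, a collinear point just replaces the pending b, and points are appended to the output only once finalized
import Mathlib
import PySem

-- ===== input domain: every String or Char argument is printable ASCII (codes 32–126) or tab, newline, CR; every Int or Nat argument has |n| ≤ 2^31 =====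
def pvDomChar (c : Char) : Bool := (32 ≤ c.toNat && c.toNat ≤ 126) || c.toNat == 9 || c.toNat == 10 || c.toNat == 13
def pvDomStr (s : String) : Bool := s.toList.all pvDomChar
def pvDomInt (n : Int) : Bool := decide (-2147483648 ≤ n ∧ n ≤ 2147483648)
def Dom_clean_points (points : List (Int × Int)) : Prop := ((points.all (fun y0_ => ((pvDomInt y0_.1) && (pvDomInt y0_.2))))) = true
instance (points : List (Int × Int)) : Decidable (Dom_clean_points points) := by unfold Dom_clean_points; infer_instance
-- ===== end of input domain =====

-- B replaces A's two passes and in-place final[-1] mutation by one pass with a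
-- pending pair (a,b): finalized points are only ever appended; same return value.


-- ===== PORT A =====
-- first loop of A: consecutive dedupe; `last` is cleaned[-1], result is the rest of `cleaned`
def cpDedup (last : Int × Int) : List (Int × Int) → List (Int × Int)
  | [] => []
  | p :: ps => if p ≠ last then p :: cpDedup p ps else cpDedup last ps

-- second loop of A, accumulator kept reversed (head = final[-1], second = final[-2])
def cpCollapseStep (rev : List (Int × Int)) (p : Int × Int) : List (Int × Int) :=
  match rev with
  | b :: a :: rest =>
      if (a.1 = b.1 ∧ b.1 = p.1) ∨ (a.2 = b.2 ∧ b.2 = p.2) then p :: a :: rest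
      else p :: b :: a :: rest
  | _ => p :: rev

def clean_points (points : List (Int × Int)) : List (Int × Int) :=
  match points with
  | [] => []  -- unreachable: Pre_ excludes [] (Python raises IndexError on points[0])
  | p0 :: rest =>
      let cleaned := p0 :: cpDedup p0 rest
      (cleaned.tail.foldl cpCollapseStep [cleaned.head!]).reverse

-- ===== PORT B =====
-- B's loop state: (a = point before the pending one, if any; b = pending point; out = finalized prefix)
def cpStep (s : Option (Int × Int) × (Int × Int) × List (Int × Int)) (p : Int × Int) :
    Option (Int × Int) × (Int × Int) × List (Int × Int) :=
  if p = s.2.1 then s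
  else
    match s.1 with
    | some a =>
        if (a.1 = s.2.1.1 ∧ s.2.1.1 = p.1) ∨ (a.2 = s.2.1.2 ∧ s.2.1.2 = p.2) then
          (some a, p, s.2.2)
        else (some s.2.1, p, s.2.2 ++ [s.2.1])
    | none => (some s.2.1, p, s.2.2 ++ [s.2.1])

def clean_points_alt (points : List (Int × Int)) : List (Int × Int) :=
  match points with
  | [] => []  -- unreachable: Pre_ excludes [] (B also indexes points[0])
  | p0 :: rest =>
      let s := rest.foldl cpStep (none, p0, [])
      s.2.2 ++ [s.2.1]

-- ===== PRECONDITION & SPEC =====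
-- Pre_ excludes only the empty list, on which A (and B) raise IndexError at points[0].
def Pre_clean_points (points : List (Int × Int)) : Prop := points ≠ []
instance (points : List (Int × Int)) : Decidable (Pre_clean_points points) := by
  unfold Pre_clean_points; infer_instance
def pvWitness_clean_points : (List (Int × Int)) := [(0, 0), (0, 1), (0, 2), (3, 2)]

def Spec_clean_points (points : List (Int × Int)) (out : List (Int × Int)) : Prop := out = clean_points_alt points
instance (points : List (Int × Int)) (out : List (Int × Int)) : Decidable (Spec_clean_points points out) := by unfold Spec_clean_points; infer_instance

-- ===== CLAIM (what is proved, stated in full; the proofs are below) =====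
def Claim_equal_clean_points : Prop := ∀ (points : List (Int × Int)), Dom_clean_points points → Pre_clean_points points → Spec_clean_points points (clean_points points)

-- ===== LEMMAS AND PROOFS =====
-- fused form of A: one fold over the raw tail with state (last deduped point, reversed final)
def cpAltStep (s : (Int × Int) × List (Int × Int)) (p : Int × Int) :
    (Int × Int) × List (Int × Int) :=
  if p = s.1 then s else (p, cpCollapseStep s.2 p)

-- the last accepted point after deduping xs starting from `last`
def cpDLast (last : Int × Int) : List (Int × Int) → Int × Int
  | [] => last
  | p :: ps => if p = last then cpDLast last ps else cpDLast p ps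

-- fusion: the fold over the raw tail = A's collapse fold over the deduped tail
theorem cpFusion (xs : List (Int × Int)) : ∀ (last : Int × Int) (rev : List (Int × Int)),
    xs.foldl cpAltStep (last, rev) =
      (cpDLast last xs, (cpDedup last xs).foldl cpCollapseStep rev) := by
  induction xs with
  | nil => intro last rev; simp [cpDLast, cpDedup]
  | cons p xs ih =>
    intro last rev
    by_cases h : p = last
    · simp [cpAltStep, cpDLast, cpDedup, h, ih]
    · simp [cpAltStep, cpDLast, cpDedup, h, ih]

-- the fused A-fold over state (b, b :: rout) matches B's fold over (rout.head?, b, rout.reverse)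
theorem cpKey (xs : List (Int × Int)) : ∀ (b : Int × Int) (rout : List (Int × Int)),
    xs.foldl cpAltStep (b, b :: rout) =
      ((xs.foldl cpStep (rout.head?, b, rout.reverse)).2.1,
       (xs.foldl cpStep (rout.head?, b, rout.reverse)).2.1 ::
         (xs.foldl cpStep (rout.head?, b, rout.reverse)).2.2.reverse) := by
  induction xs with
  | nil => intro b rout; simp
  | cons p xs ih =>
    intro b rout
    by_cases h : p = b
    · simpa [cpAltStep, cpStep, h] using ih b rout
    · match rout with
      | [] =>
          simpa [cpAltStep, cpStep, cpCollapseStep, h] using ih p [b]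
      | a :: rest =>
          by_cases hc : (a.1 = b.1 ∧ b.1 = p.1) ∨ (a.2 = b.2 ∧ b.2 = p.2)
          · simpa [cpAltStep, cpStep, cpCollapseStep, h, hc] using ih p (a :: rest)
          · simpa [cpAltStep, cpStep, cpCollapseStep, h, hc] using ih p (b :: a :: rest)

-- ===== VERDICT (by name: the statement is the Claim_ definition above) =====
theorem clean_points_spec : Claim_equal_clean_points := by
  intro points _ hpre
  unfold Spec_clean_points
  match points with
  | [] => exact absurd rfl hpre
  | p0 :: rest =>
    simp only [clean_points, clean_points_alt, List.tail_cons, List.head!]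
    have hkey := cpKey rest p0 []
    rw [cpFusion] at hkey
    simp only [List.head?_nil, List.reverse_nil] at hkey
    have h2 := congrArg Prod.snd hkey
    simp only at h2
    rw [h2]
    simp
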